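-- pv_equiv track=rewrite | github.com/MartinKirkegaardDK/School- | bank.py | risk_analysis
-- ===== SOURCE A (Python) =====
-- def filter_withdrawals(transactions):
-- 	li = []
-- 	x = 0
-- 	for elm in transactions:
-- 		if transactions[x] < 0:
-- 			li.append(transactions[x])
-- 			x = x +1
-- 		else:
-- 			x = x +1
-- 	return li
--
-- def risk_analysis(transactions):
-- 	li = []
-- 	for elm in transactions:
-- 		li.append(filter_withdrawals(transactions))
--
-- 	val_max = 0
-- 	for i in li[0]:
-- 		for k in li[0]:
-- 			if val_max > i:
-- 				val_max = k
-- 			else: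
-- 				None
-- 	return val_max
-- ===== SOURCE B (Python) =====
-- def risk_analysis(transactions):
--     s = sorted(transactions)
--     m = s[0]
--     return m if m < 0 else 0
-- ===== Notes on version B (the rewrite author's own statement) =====
-- stated objective: faster
-- what changed: Replaces A's indexed filter pass plus a quadratic nested scan over the negatives with sort-then-take-first: the global minimum is the answer when negative, else 0.
import Mathlib
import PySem

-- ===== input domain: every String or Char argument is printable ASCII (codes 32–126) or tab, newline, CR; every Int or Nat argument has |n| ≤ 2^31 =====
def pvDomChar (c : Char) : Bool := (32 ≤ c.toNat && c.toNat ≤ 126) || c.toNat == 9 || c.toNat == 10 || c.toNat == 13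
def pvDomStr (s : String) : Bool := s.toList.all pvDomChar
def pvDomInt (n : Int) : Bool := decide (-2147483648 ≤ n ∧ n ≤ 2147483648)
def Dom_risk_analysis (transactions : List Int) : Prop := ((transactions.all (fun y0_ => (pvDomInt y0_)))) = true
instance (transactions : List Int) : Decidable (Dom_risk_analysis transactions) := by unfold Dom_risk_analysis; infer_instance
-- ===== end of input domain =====

-- B replaces A's filter-plus-quadratic-nested-scan with sort-then-take-first (simpler; same return value).

-- ===== PORT A =====
-- for elm in transactions: if transactions[x] < 0: li.append(transactions[x]); x += 1 else x += 1
-- (transactions[x] is always in range during the loop; the 'none' branch is unreachable in Python)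
def pvFwStep (ts : List Int) (st : List Int × Int) (_elm : Int) : List Int × Int :=
  match PySem.List.pyGet? ts st.2 with
  | some v => if v < 0 then (st.1 ++ [v], st.2 + 1) else (st.1, st.2 + 1)
  | none => (st.1, st.2 + 1)

def filter_withdrawals (transactions : List Int) : List Int :=
  (transactions.foldl (pvFwStep transactions) ([], 0)).1

def risk_analysis (transactions : List Int) : Int :=
  let li : List (List Int) :=
    transactions.foldl (fun acc _elm => acc ++ [filter_withdrawals transactions]) []
  match PySem.List.pyGet? li 0 with
  | none => 0  -- Python raises IndexError at li[0]; excluded by Pre_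
  | some li0 =>
    li0.foldl (fun val_max i =>
      li0.foldl (fun val_max k => if val_max > i then k else val_max) val_max) 0

-- ===== PORT B =====
def risk_analysis_alt (transactions : List Int) : Int :=
  let s := PySem.List.sorted transactions (fun x => x) false
  match PySem.List.pyGet? s 0 with
  | none => 0  -- Python raises IndexError at s[0]; excluded by Pre_
  | some m => if m < 0 then m else 0

-- ===== PRECONDITION & SPEC =====
-- On the empty list both A and B raise IndexError ([][0]); everything else is admitted.
def Pre_risk_analysis (transactions : List Int) : Prop := transactions ≠ []
instance (transactions : List Int) : Decidable (Pre_risk_analysis transactions) := by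
  unfold Pre_risk_analysis; infer_instance

def pvWitness_risk_analysis : List Int := [3, -7, 2, -1]

def Spec_risk_analysis (transactions : List Int) (out : Int) : Prop := out = risk_analysis_alt transactions
instance (transactions : List Int) (out : Int) : Decidable (Spec_risk_analysis transactions out) := by unfold Spec_risk_analysis; infer_instance

-- ===== CLAIM (what is proved, stated in full; the proofs are below) =====
def Claim_equal_risk_analysis : Prop := ∀ (transactions : List Int), Dom_risk_analysis transactions → Pre_risk_analysis transactions → Spec_risk_analysis transactions (risk_analysis transactions)

-- ===== LEMMAS AND PROOFS =====

-- filter_withdrawals loop invariant: folding the suffix-counter list with index k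
theorem pvFw_aux (ts : List Int) : ∀ (count : List Int) (acc : List Int) (k : Nat),
    (count.foldl (pvFwStep ts) (acc, (k : Int))).1
      = acc ++ ((ts.drop k).take count.length).filter (fun t => decide (t < 0)) := by
  intro count
  induction count with
  | nil => intro acc k; simp
  | cons c rest ih =>
    intro acc k
    by_cases hk : k < ts.length
    · have hget : PySem.List.pyGet? ts (k : Int) = some ts[k] := by
        simp [PySem.List.pyGet?_natCast, List.getElem?_eq_getElem hk]
      have hdrop : ts.drop k = ts[k] :: ts.drop (k + 1) := List.drop_eq_getElem_cons hk
      have hcast : ((k : Int) + 1) = ((k + 1 : Nat) : Int) := by push_cast; ring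
      have hstep : pvFwStep ts (acc, (k : Int)) c
          = (if ts[k] < 0 then acc ++ [ts[k]] else acc, ((k + 1 : Nat) : Int)) := by
        simp only [pvFwStep, hget, hcast]
        split_ifs <;> rfl
      rw [List.foldl_cons, hstep, ih]
      rw [hdrop, List.length_cons, List.take_succ_cons, List.filter_cons]
      by_cases hneg : ts[k] < 0
      · simp [hneg]
      · simp [hneg]
    · have hget : PySem.List.pyGet? ts (k : Int) = none := by
        rw [PySem.List.pyGet?_natCast]
        simp; omega
      have hcast : ((k : Int) + 1) = ((k + 1 : Nat) : Int) := by push_cast; ring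
      have hstep : pvFwStep ts (acc, (k : Int)) c = (acc, ((k + 1 : Nat) : Int)) := by
        simp only [pvFwStep, hget, hcast]
      rw [List.foldl_cons, hstep, ih]
      have h1 : ts.drop k = [] := List.drop_eq_nil_of_le (by omega)
      have h2 : ts.drop (k + 1) = [] := List.drop_eq_nil_of_le (by omega)
      simp [h1, h2]

theorem filter_withdrawals_eq (ts : List Int) :
    filter_withdrawals ts = ts.filter (fun t => decide (t < 0)) := by
  have := pvFw_aux ts ts [] 0
  simpa [filter_withdrawals, List.take_of_length_le] using this

-- the inner for-k loop: once val_max ≤ i it never changes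
theorem pvInner_fixed (i v : Int) (hvi : v ≤ i) : ∀ (L : List Int),
    L.foldl (fun val_max k => if val_max > i then k else val_max) v = v := by
  intro L
  induction L with
  | nil => rfl
  | cons k rest ih => simp [show ¬ v > i by omega, ih]

-- the inner for-k loop from a state v > i: result is the first element ≤ i, else the last element
theorem pvInner_scan (i : Int) : ∀ (L : List Int) (v : Int), v > i →
    L.foldl (fun val_max k => if val_max > i then k else val_max) v
      = match L.find? (fun k => decide (k ≤ i)) with
        | some m => m
        | none => L.getLast?.getD v := by
  intro L
  induction L with
  | nil => intro v _; rfl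
  | cons k rest ih =>
    intro v hv
    by_cases hk : k ≤ i
    · simp [hv, List.find?, hk, pvInner_fixed i k hk rest]
    · have h1 : (k :: rest).foldl (fun val_max k => if val_max > i then k else val_max) v
          = rest.foldl (fun val_max k => if val_max > i then k else val_max) k := by
        simp [hv]
      rw [h1, ih k (by omega)]
      cases hf : rest.find? (fun k => decide (k ≤ i)) with
      | some m => simp [List.find?, hk, hf]
      | none =>
        cases rest with
        | nil => simp [List.find?, show (decide (k ≤ i)) = false by simpa using hk]
        | cons r rs =>
          obtain ⟨g, hg⟩ : ∃ g, (r :: rs).getLast? = some g :=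
            ⟨(r :: rs).getLast (by simp), List.getLast?_eq_some_getLast (by simp)⟩
          rw [List.find?_cons_of_neg (by simpa using hk), hf, List.getLast?_cons_cons, hg]
          rfl

-- i ∈ negs means the inner scan finds some element ≤ i
theorem pvFind_some (negs : List Int) (i : Int) (hi : i ∈ negs) :
    ∃ m, negs.find? (fun k => decide (k ≤ i)) = some m ∧ m ∈ negs ∧ m ≤ i := by
  have hsome : (negs.find? (fun k => decide (k ≤ i))).isSome :=
    List.find?_isSome.2 ⟨i, hi, by simp⟩
  obtain ⟨m, hm⟩ := Option.isSome_iff_exists.1 hsome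
  exact ⟨m, hm, List.mem_of_find?_eq_some hm, by simpa using List.find?_some hm⟩

-- the outer loop invariant (v is 0 at entry, afterwards an element of negs)
theorem pvOuter_aux (negs : List Int) :
    ∀ (rest : List Int), (∀ x ∈ rest, x ∈ negs) → ∀ (v : Int), (v = 0 ∨ v ∈ negs) →
    (rest.foldl (fun val_max i =>
        negs.foldl (fun val_max k => if val_max > i then k else val_max) val_max) v = v
      ∨ rest.foldl (fun val_max i =>
        negs.foldl (fun val_max k => if val_max > i then k else val_max) val_max) v ∈ negs)
    ∧ rest.foldl (fun val_max i =>
        negs.foldl (fun val_max k => if val_max > i then k else val_max) val_max) v ≤ v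
    ∧ ∀ x ∈ rest, rest.foldl (fun val_max i =>
        negs.foldl (fun val_max k => if val_max > i then k else val_max) val_max) v ≤ x := by
  intro rest
  induction rest with
  | nil => intro _ v _; exact ⟨Or.inl rfl, le_refl v, by simp⟩
  | cons i t ih =>
    intro hsub v hv
    have hi : i ∈ negs := hsub i (by simp)
    have hsub' : ∀ x ∈ t, x ∈ negs := fun x hx => hsub x (by simp [hx])
    by_cases hvi : v > i
    · obtain ⟨m, hm, hmmem, hmle⟩ := pvFind_some negs i hi
      have hin : negs.foldl (fun val_max k => if val_max > i then k else val_max) v = m := by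
        rw [pvInner_scan i negs v hvi, hm]
      rw [List.foldl_cons, hin]
      obtain ⟨h1, h2, h3⟩ := ih hsub' m (Or.inr hmmem)
      refine ⟨?_, by omega, ?_⟩
      · rcases h1 with h1 | h1
        · rw [h1]; exact Or.inr hmmem
        · exact Or.inr h1
      · intro x hx
        rcases List.mem_cons.1 hx with rfl | hx
        · omega
        · exact h3 x hx
    · have hin : negs.foldl (fun val_max k => if val_max > i then k else val_max) v = v :=
        pvInner_fixed i v (by omega) negs
      rw [List.foldl_cons, hin]
      obtain ⟨h1, h2, h3⟩ := ih hsub' v hv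
      refine ⟨h1, h2, ?_⟩
      intro x hx
      rcases List.mem_cons.1 hx with rfl | hx
      · omega
      · exact h3 x hx

-- A's nested loops over the negatives compute their minimum (0 if there are none)
theorem pvNested_min (negs : List Int) (hneg : ∀ x ∈ negs, x < 0) :
    (negs = [] ∧ negs.foldl (fun val_max i =>
        negs.foldl (fun val_max k => if val_max > i then k else val_max) val_max) 0 = 0)
    ∨ (negs.foldl (fun val_max i =>
        negs.foldl (fun val_max k => if val_max > i then k else val_max) val_max) 0 ∈ negs
       ∧ ∀ x ∈ negs, negs.foldl (fun val_max i =>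
        negs.foldl (fun val_max k => if val_max > i then k else val_max) val_max) 0 ≤ x) := by
  obtain ⟨h1, _, h3⟩ := pvOuter_aux negs negs (fun _ hx => hx) 0 (Or.inl rfl)
  by_cases hnil : negs = []
  · subst hnil; exact Or.inl ⟨rfl, rfl⟩
  · right
    obtain ⟨i, hi⟩ := List.exists_mem_of_ne_nil negs hnil
    have hri := h3 i hi
    have hineg : i < 0 := hneg i hi
    rcases h1 with h1 | h1
    · omega
    · exact ⟨h1, h3⟩

-- ===== VERDICT (by name: the statement is the Claim_ definition above) =====
theorem risk_analysis_spec : Claim_equal_risk_analysis := by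
  intro ts _hdom hpre
  unfold Spec_risk_analysis
  -- B's side: head of the sorted list is a minimum element of ts
  obtain ⟨h, t, rfl⟩ := List.exists_cons_of_ne_nil hpre
  obtain ⟨m, s', hs⟩ : ∃ m s', PySem.List.sorted (h :: t) (fun x => x) false = m :: s' := by
    cases hsrt : PySem.List.sorted (h :: t) (fun x : Int => x) false with
    | nil =>
      have hperm := PySem.List.sorted_perm (h :: t) (fun x : Int => x) false
      rw [hsrt] at hperm
      exact absurd hperm.symm.eq_nil (by simp)
    | cons m s' => exact ⟨m, s', rfl⟩
  have hmmem : m ∈ h :: t := by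
    have := PySem.List.mem_sorted (h :: t) (fun x : Int => x) false m
    rw [hs] at this; exact this.1 (by simp)
  have hmle : ∀ y ∈ h :: t, m ≤ y :=
    PySem.List.key_head_sorted_le (h :: t) (fun x : Int => x) hs
  -- A's side: li[0] is the list of negatives, and the nested loops find its minimum
  have hA : risk_analysis (h :: t)
      = (filter_withdrawals (h :: t)).foldl (fun val_max i =>
          (filter_withdrawals (h :: t)).foldl
            (fun val_max k => if val_max > i then k else val_max) val_max) 0 := by
    simp only [risk_analysis]
    rw [PySem.List.foldl_append_singleton_eq_map]
    simp only [List.nil_append, List.map_cons, PySem.List.pyGet?_zero_cons]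
  set negs := filter_withdrawals (h :: t) with hnegs
  have hfilt : negs = (h :: t).filter (fun x => decide (x < 0)) := filter_withdrawals_eq _
  have hnegall : ∀ x ∈ negs, x < 0 := by
    intro x hx; rw [hfilt] at hx; simpa using (List.mem_filter.1 hx).2
  rw [hA]
  unfold risk_analysis_alt
  simp only [hs, PySem.List.pyGet?_zero_cons]
  rcases pvNested_min negs hnegall with ⟨hnil, hr⟩ | ⟨hrmem, hrle⟩
  · -- no negatives: A returns 0; m ≥ 0 since any negative member of ts would be in negs
    rw [hr]
    have hm0 : ¬ m < 0 := by
      intro hm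
      have : m ∈ negs := by rw [hfilt]; exact List.mem_filter.2 ⟨hmmem, by simpa using hm⟩
      rw [hnil] at this; simp at this
    simp [hm0]
  · -- the loop result r and m are both least: they coincide
    set r := negs.foldl (fun val_max i =>
        negs.foldl (fun val_max k => if val_max > i then k else val_max) val_max) 0 with hrdef
    have hrts : r ∈ h :: t := by
      have := hrmem; rw [hfilt] at this; exact (List.mem_filter.1 this).1
    have hrneg : r < 0 := hnegall r hrmem
    have hmr : m ≤ r := hmle r hrts
    have hm0 : m < 0 := by omega
    have hmnegs : m ∈ negs := by
      rw [hfilt]; exact List.mem_filter.2 ⟨hmmem, by simpa using hm0⟩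
    have hrm : r ≤ m := hrle m hmnegs
    have hrm' : r = m := by omega
    simp [hrm', hm0]
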